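-- pv_equiv track=rewrite | github.com/MorrissyLab/GCAR1_public | 02_Visium_HD/01_probe_design/probe_creation.py | probes_from_sequence
-- ===== SOURCE A (Python) =====
-- def probes_from_sequence(reverse_antisense_strand, total_probe_length):
--     possible_probes = []
--
--     for i in range(len(reverse_antisense_strand)-total_probe_length+1):
--         N_count = reverse_antisense_strand[i:i+total_probe_length].count("N")
--
--         # If there's an "N" in the probe, we add N number of extra nucleotide to the probe. The N is indicative of the probe spanning a domain junction.
--         if N_count >= 1:
--             probe_seq = reverse_antisense_strand[i:i+total_probe_length+N_count]
--         else:
--             probe_seq = reverse_antisense_strand[i:i+total_probe_length]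
--         possible_probes.append(probe_seq)
--
--     return possible_probes
-- ===== SOURCE B (Python) =====
-- def probes_from_sequence(reverse_antisense_strand, total_probe_length):
--     s = reverse_antisense_strand
--     # prefix[j] = number of 'N' among the first j characters
--     prefix = [0]
--     for ch in s:
--         prefix.append(prefix[-1] + (1 if ch == "N" else 0))
--     possible_probes = []
--     for i in range(len(s) - total_probe_length + 1):
--         n_count = prefix[i + total_probe_length] - prefix[i]
--         end = i + total_probe_length + n_count if n_count >= 1 else i + total_probe_length
--         possible_probes.append(s[i:end])
--     return possible_probes
-- ===== Notes on version B (the rewrite author's own statement) =====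
-- stated objective: alternative
-- what changed: B builds a prefix-sum table of cumulative 'N' counts in one pass and derives each window's N count by two table lookups, instead of A's rescan of every length-L window with str.count; slicing the probes out dominates the runtime, so the measured speed is similar.
-- outside the precondition, e.g. on probes_from_sequence('ACGT', -1): A returns ['ACG', '', '', '', '', ''], B raises IndexError
import Mathlib
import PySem

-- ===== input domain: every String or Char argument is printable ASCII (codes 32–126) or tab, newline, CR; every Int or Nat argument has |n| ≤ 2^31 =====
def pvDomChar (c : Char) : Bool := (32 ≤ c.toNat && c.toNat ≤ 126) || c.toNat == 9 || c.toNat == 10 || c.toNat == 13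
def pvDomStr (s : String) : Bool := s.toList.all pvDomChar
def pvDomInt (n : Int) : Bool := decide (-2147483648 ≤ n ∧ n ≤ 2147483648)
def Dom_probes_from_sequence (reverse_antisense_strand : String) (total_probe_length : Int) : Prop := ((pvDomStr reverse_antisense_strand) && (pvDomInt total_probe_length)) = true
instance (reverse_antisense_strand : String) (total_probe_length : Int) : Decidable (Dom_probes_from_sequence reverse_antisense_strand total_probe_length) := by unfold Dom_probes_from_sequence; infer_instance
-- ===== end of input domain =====

-- B derives each window's N count from a precomputed prefix-sum table instead of A's
-- per-window str.count rescan; equivalence proved for 0 ≤ total_probe_length.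


-- ===== PORT A =====
def probes_from_sequence (reverse_antisense_strand : String) (total_probe_length : Int) : List String :=
  (PySem.List.pyRange 0 (PySem.Str.len reverse_antisense_strand - total_probe_length + 1) 1).foldl
    (fun possible_probes i =>
      let N_count : Int :=
        (PySem.Str.count (PySem.Str.slice reverse_antisense_strand (some i) (some (i + total_probe_length))) "N" : Int)
      let probe_seq :=
        if 1 ≤ N_count then
          PySem.Str.slice reverse_antisense_strand (some i) (some (i + total_probe_length + N_count))
        else
          PySem.Str.slice reverse_antisense_strand (some i) (some (i + total_probe_length))
      possible_probes ++ [probe_seq]) []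

-- ===== PORT B =====
-- prefix[-1] is ported as pyGetD p (-1) 0; prefix[i] / prefix[i+L] as pyGetD prefix _ 0
-- (exact wherever the index is in range, which Pre_ guarantees for every access B makes).
def pvPrefixB (s : String) : List Int :=
  s.toList.foldl (fun p ch => p ++ [PySem.List.pyGetD p (-1) 0 + (if ch = 'N' then 1 else 0)]) [0]

def probes_from_sequence_alt (reverse_antisense_strand : String) (total_probe_length : Int) : List String :=
  let pref := pvPrefixB reverse_antisense_strand
  (PySem.List.pyRange 0 (PySem.Str.len reverse_antisense_strand - total_probe_length + 1) 1).foldl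
    (fun possible_probes i =>
      let n_count : Int :=
        PySem.List.pyGetD pref (i + total_probe_length) 0 - PySem.List.pyGetD pref i 0
      let e := if 1 ≤ n_count then i + total_probe_length + n_count else i + total_probe_length
      possible_probes ++ [PySem.Str.slice reverse_antisense_strand (some i) (some e)]) []

-- ===== PRECONDITION & SPEC =====
-- Pre_ restricts to nonnegative probe lengths, the function's natural domain: for a negative
-- total_probe_length A returns a degenerate list built from negative-index slice artefacts,
-- while B's prefix-table indexing raises IndexError there.
def Pre_probes_from_sequence (reverse_antisense_strand : String) (total_probe_length : Int) : Prop :=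
  0 ≤ total_probe_length
instance (reverse_antisense_strand : String) (total_probe_length : Int) : Decidable (Pre_probes_from_sequence reverse_antisense_strand total_probe_length) := by unfold Pre_probes_from_sequence; infer_instance

def pvWitness_probes_from_sequence : String × Int := ("NACGT", 3)

def Spec_probes_from_sequence (reverse_antisense_strand : String) (total_probe_length : Int) (out : List String) : Prop := out = probes_from_sequence_alt reverse_antisense_strand total_probe_length
instance (reverse_antisense_strand : String) (total_probe_length : Int) (out : List String) : Decidable (Spec_probes_from_sequence reverse_antisense_strand total_probe_length out) := by unfold Spec_probes_from_sequence; infer_instance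

-- ===== CLAIM (what is proved, stated in full; the proofs are below) =====
def Claim_equal_probes_from_sequence : Prop := ∀ (reverse_antisense_strand : String) (total_probe_length : Int), Dom_probes_from_sequence reverse_antisense_strand total_probe_length → Pre_probes_from_sequence reverse_antisense_strand total_probe_length → Spec_probes_from_sequence reverse_antisense_strand total_probe_length (probes_from_sequence reverse_antisense_strand total_probe_length)

-- ===== LEMMAS AND PROOFS =====

-- Python's str.count with a single-character needle is the character count.
theorem pv_go_single (c : Char) : ∀ (fuel : Nat) (s : List Char) (acc : Nat), s.length ≤ fuel →
    PySem.Chars.count.go [c] fuel s acc = acc + s.count c := by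
  intro fuel
  induction fuel with
  | zero => intro s acc h; cases s with
    | nil => simp [PySem.Chars.count.go]
    | cons a t => simp at h
  | succ n ih => intro s acc h; cases s with
    | nil => simp [PySem.Chars.count.go]
    | cons a t =>
      simp only [PySem.Chars.count.go]
      by_cases hc : a = c
      · simp only [hc, List.isPrefixOf, Bool.and_true, beq_self_eq_true, if_true,
          List.length_singleton, List.drop_one, List.tail_cons, List.count_cons_self]
        rw [ih t (acc + 1) (by simpa using h)]; omega
      · have hne : (c == a) = false := by simp [Ne.symm hc]
        simp only [List.isPrefixOf, Bool.and_true, hne, Bool.false_eq_true, if_false]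
        simp only [List.count_cons, beq_iff_eq, hc, if_false, Nat.add_zero]
        exact ih t acc (by simpa using h)

theorem pv_count_single (c : Char) (s : List Char) : PySem.Chars.count s [c] = s.count c := by
  simp [PySem.Chars.count, pv_go_single c s.length s 0 le_rfl]

-- the mathematical prefix table
def pvPref (cs : List Char) : List Int :=
  (List.range (cs.length + 1)).map (fun j => ((cs.take j).count 'N' : Int))

theorem pvPref_append_singleton (xs : List Char) (ch : Char) :
    pvPref (xs ++ [ch]) = pvPref xs ++ [((xs.count 'N' : Int) + if ch = 'N' then 1 else 0)] := by
  unfold pvPref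
  rw [show (xs ++ [ch]).length + 1 = (xs.length + 1) + 1 by simp]
  rw [List.range_succ, List.map_append]
  congr 1
  · apply List.map_congr_left; intro j hj
    rw [List.take_append_of_le_length (by simp at hj; omega)]
  · have : (xs ++ [ch]).take (xs.length + 1) = xs ++ [ch] := by
      apply List.take_of_length_le; simp
    simp only [List.map_cons, List.map_nil, this, List.count_append]
    by_cases hch : ch = 'N' <;> simp [hch]

theorem pvPref_build : ∀ (cs done : List Char),
    cs.foldl (fun p ch => p ++ [PySem.List.pyGetD p (-1) 0 + (if ch = 'N' then 1 else 0)])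
      (pvPref done) = pvPref (done ++ cs) := by
  intro cs
  induction cs with
  | nil => intro done; simp
  | cons ch t ih =>
    intro done
    have hstep : pvPref done ++ [PySem.List.pyGetD (pvPref done) (-1) 0 + (if ch = 'N' then 1 else 0)]
        = pvPref (done ++ [ch]) := by
      have hsplit : pvPref done
          = (List.range done.length).map (fun j => ((done.take j).count 'N' : Int))
            ++ [((done.take done.length).count 'N' : Int)] := by
        unfold pvPref; rw [List.range_succ, List.map_append]; simp
      rw [pvPref_append_singleton, hsplit, PySem.List.pyGetD_neg_one_append_singleton]
      simp
    simp only [List.foldl_cons]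
    rw [hstep, ih (done ++ [ch]), List.append_assoc]; rfl

theorem pvPrefixB_eq (s : String) : pvPrefixB s = pvPref s.toList := by
  have h0 : pvPref ([] : List Char) = [0] := rfl
  have := pvPref_build s.toList []
  rw [h0] at this
  simpa [pvPrefixB] using this

theorem pvPref_getD (cs : List Char) (k : Nat) (hk : k ≤ cs.length) :
    PySem.List.pyGetD (pvPref cs) (k : Int) 0 = ((cs.take k).count 'N' : Int) := by
  rw [PySem.List.pyGetD_of_nonneg _ _ (by positivity)]
  simp only [Int.toNat_natCast, pvPref]
  exact PySem.List.getD_map_range _ _ _ _ (by omega)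

-- ===== VERDICT (by name: the statement is the Claim_ definition above) =====
theorem probes_from_sequence_spec : Claim_equal_probes_from_sequence := by
  intro s L _hdom hL
  unfold Pre_probes_from_sequence at hL
  unfold Spec_probes_from_sequence probes_from_sequence probes_from_sequence_alt
  simp only [PySem.List.foldl_append_singleton_eq_map, List.nil_append]
  apply List.map_congr_left
  intro i hi
  rw [PySem.List.mem_pyRange_one] at hi
  obtain ⟨hi0, hi1⟩ := hi
  have hlen : PySem.Str.len s = (s.toList.length : Int) := by simp
  rw [hlen] at hi1
  have hiL : i + L ≤ (s.toList.length : Int) := by omega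
  have e1 : PySem.List.pyGetD (pvPref s.toList) (i + L) 0
      = ((s.toList.take (i + L).toNat).count 'N' : Int) := by
    have h := pvPref_getD s.toList (i + L).toNat (by omega)
    rwa [Int.toNat_of_nonneg (by omega)] at h
  have e2 : PySem.List.pyGetD (pvPref s.toList) i 0
      = ((s.toList.take i.toNat).count 'N' : Int) := by
    have h := pvPref_getD s.toList i.toNat (by omega)
    rwa [Int.toNat_of_nonneg hi0] at h
  have hA : (PySem.Str.count (PySem.Str.slice s (some i) (some (i + L))) "N" : Int)
      = ((s.toList.take (i + L).toNat).count 'N' : Int) - ((s.toList.take i.toNat).count 'N' : Int) := by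
    rw [PySem.Str.count_eq, PySem.Str.toList_slice, PySem.Chars.slice_eq_listSlice]
    rw [show ("N" : String).toList = ['N'] from rfl, pv_count_single]
    rw [PySem.List.slice_toNat _ hi0 (by omega)]
    rw [show s.toList.take (i + L).toNat
        = s.toList.take i.toNat ++ (s.toList.drop i.toNat).take ((i + L).toNat - i.toNat) by
      rw [← List.take_add, show i.toNat + ((i + L).toNat - i.toNat) = (i + L).toNat by omega]]
    rw [List.count_append]; push_cast; ring
  rw [pvPrefixB_eq, e1, e2, ← hA]
  split_ifs <;> rfl
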